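-- pv_equiv track=rewrite | github.com/naqushab/ScalerAcademy | Scaler/Advanced/Bit Manipulation - II/HW1.py | solve
-- ===== SOURCE A (Python) =====
-- def solve(A):
--     X = 0
--     Y = 0
--     l = len(bin(A)) - 2
--     Y = 1 << (l)
--     for i in range(l):
--         mask = 1<<i
--         if mask & A == 0:
--             X = X | mask
--     return X ^ Y
-- ===== SOURCE B (Python) =====
-- def solve(A):
--     # Closed form: the answer is the bitwise complement of A's low l bits plus
--     # the top bit 2^l; as arithmetic: 2*2^l - 1 - (A mod 2^l).
--     l = len(bin(A)) - 2
--     p = 1 << l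
--     return 2 * p - 1 - A % p
-- ===== Notes on version B (the rewrite author's own statement) =====
-- stated objective: simpler
-- what changed: Replaced the bit-by-bit loop (test each low bit of A, OR the complement bits into X, then XOR in the top bit) with a single closed-form arithmetic expression: twice the top-bit power minus one minus A's residue modulo that power, with l taken from len(bin(A)) exactly as in A.
import Mathlib
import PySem

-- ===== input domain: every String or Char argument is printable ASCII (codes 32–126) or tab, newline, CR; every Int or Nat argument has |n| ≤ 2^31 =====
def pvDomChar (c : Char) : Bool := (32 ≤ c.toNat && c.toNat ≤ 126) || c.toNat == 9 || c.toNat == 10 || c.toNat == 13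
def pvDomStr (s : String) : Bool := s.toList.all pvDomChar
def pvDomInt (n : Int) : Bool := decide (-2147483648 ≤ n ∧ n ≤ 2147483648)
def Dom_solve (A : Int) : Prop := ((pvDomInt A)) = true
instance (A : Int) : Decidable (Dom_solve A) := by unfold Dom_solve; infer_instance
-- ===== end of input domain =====

-- B replaces A's bit-by-bit complement loop by the closed form 2*2^l - 1 - (A mod 2^l)
-- (same l = len(bin(A)) - 2): simpler, no loop.

-- ===== PORT A =====
-- Python: X = 0; Y = 0; l = len(bin(A)) - 2; Y = 1 << l;
--         for i in range(l): mask = 1 << i; if mask & A == 0: X = X | mask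
--         return X ^ Y
-- (shift amounts l and i are nonnegative here, so `.toNat` is exact for Python's `<<`)
def solve (A : Int) : Int :=
  let X : Int := 0
  let _Y : Int := 0
  let l : Int := PySem.Str.len (PySem.Int.pyBin A) - 2
  let Y : Int := (1 : Int) <<< l.toNat
  let X : Int := (PySem.List.pyRange 0 l 1).foldl
    (fun X i =>
      let mask : Int := (1 : Int) <<< i.toNat
      if PySem.Int.band mask A = 0 then PySem.Int.bor X mask else X) X
  PySem.Int.bxor X Y

-- ===== PORT B =====
-- Python: l = len(bin(A)) - 2; p = 1 << l; return 2 * p - 1 - A % p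
def solve_alt (A : Int) : Int :=
  let l : Int := PySem.Str.len (PySem.Int.pyBin A) - 2
  let p : Int := (1 : Int) <<< l.toNat
  2 * p - 1 - PySem.Int.mod A p

-- ===== PRECONDITION & SPEC =====
def Spec_solve (A : Int) (out : Int) : Prop := out = solve_alt A
instance (A : Int) (out : Int) : Decidable (Spec_solve A out) := by unfold Spec_solve; infer_instance

-- ===== CLAIM (what is proved, stated in full; the proofs are below) =====
def Claim_equal_solve : Prop := ∀ (A : Int), Dom_solve A → Spec_solve A (solve A)

-- ===== LEMMAS AND PROOFS =====

-- `range(l)` is the naturals below l.toNat, cast to Int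
theorem pyRange01 (l : Int) :
    PySem.List.pyRange 0 l 1 = (List.range l.toNat).map (fun (k : Nat) => (k : Int)) := by
  unfold PySem.List.pyRange
  by_cases h : 0 < l
  · have h1 : (l - 0 + 1 - 1) / (1:Int) = l := by simp
    simp only [if_neg (by norm_num : (1:Int) ≠ 0), if_pos h, if_pos (by norm_num : (0:Int) < 1)]
    rw [h1]
    refine List.map_congr_left (fun k _ => ?_)
    simp
  · have hl : l.toNat = 0 := by omega
    simp only [if_neg (by norm_num : (1:Int) ≠ 0), if_pos (by norm_num : (0:Int) < 1), if_neg h,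
      hl, List.range_zero, List.map_nil]

-- Nat bit test as a bound on the residue mod 2^(k+1)
theorem natbit (b k : Nat) : b.testBit k = true ↔ 2 ^ k ≤ b % 2 ^ (k + 1) := by
  rw [Nat.testBit_eq_decide_div_mod_eq]
  have hsplit : b % (2 ^ k * 2) = b % 2 ^ k + 2 ^ k * (b / 2 ^ k % 2) := Nat.mod_mul
  have h1 : b % 2 ^ k < 2 ^ k := Nat.mod_lt _ (Nat.two_pow_pos _)
  have h2 : b / 2 ^ k % 2 < 2 := Nat.mod_lt _ (by norm_num)
  have hp : 2 ^ (k + 1) = 2 ^ k * 2 := by ring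
  rw [hp, hsplit]
  have h2' : b / 2 ^ k % 2 = 0 ∨ b / 2 ^ k % 2 = 1 := by omega
  rcases h2' with h | h <;> simp [h] <;> omega

-- A's loop guard `mask & A == 0` (mask = 2^k) as a bound on A's residue mod 2^(k+1)
theorem bitzero (A : Int) (k : Nat) :
    (PySem.Int.band ((2:Int) ^ k) A = 0) ↔ A % (2:Int) ^ (k + 1) < (2:Int) ^ k := by
  have hcast : ((2:Int) ^ k) = ((2 ^ k : Nat) : Int) := by push_cast; ring
  have hcast1 : ((2:Int) ^ (k+1)) = ((2 ^ (k+1) : Nat) : Int) := by push_cast; ring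
  have hposN : 0 < 2 ^ k := Nat.two_pow_pos k
  by_cases hA : 0 ≤ A
  · -- nonnegative A: band is the Nat `&&&` of the magnitudes
    have hA' : A = (A.toNat : Int) := (Int.toNat_of_nonneg hA).symm
    unfold PySem.Int.band
    rw [if_pos (by positivity), if_pos hA]
    rw [hcast, Int.toNat_natCast, Nat.two_pow_and]
    have hb := natbit A.toNat k
    have hpow : 2 ^ (k+1) = 2 ^ k * 2 := by ring
    have hposk : 0 < 2 ^ k := Nat.two_pow_pos k
    rw [hA', hcast1]
    suffices hN : (2 ^ k * (A.toNat.testBit k).toNat = 0) ↔ A.toNat % 2 ^ (k+1) < 2 ^ k by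
      exact_mod_cast hN
    rcases hfin : A.toNat.testBit k with _ | _
    · have h1 : ¬ 2 ^ k ≤ A.toNat % 2 ^ (k+1) := fun h => by simp [hb.mpr h] at hfin
      simp only [Bool.toNat_false, Nat.mul_zero]
      exact iff_of_true trivial (by omega)
    · have h1 : 2 ^ k ≤ A.toNat % 2 ^ (k+1) := hb.mp hfin
      simp only [Bool.toNat_true, Nat.mul_one]
      exact iff_of_false (by omega) (by omega)
  · -- negative A: band 2^k A = 2^k - (2^k &&& (-A-1)); A ≡ -(b+1) with b = (-A-1).toNat
    have hbv : ((-A - 1).toNat : Int) = -A - 1 := Int.toNat_of_nonneg (by omega)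
    set b : Nat := (-A - 1).toNat with hbdef
    unfold PySem.Int.band
    rw [if_pos (by positivity), if_neg hA]
    rw [hcast, Int.toNat_natCast, Nat.two_pow_and]
    -- left side: ↑(2^k - 2^k * t) = 0 ↔ testBit true
    have hA' : A = -(b:Int) - 1 := by omega
    -- compute A % 2^(k+1)
    have hM : ((2:Int) ^ (k+1)) = ((2 ^ (k+1) : Nat) : Int) := hcast1
    have hdm : (b : Int) = ((2 ^ (k+1) : Nat) : Int) * ((b / 2 ^ (k+1) : Nat) : Int)
        + ((b % 2 ^ (k+1) : Nat) : Int) := by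
      exact_mod_cast congrArg (Nat.cast : Nat → Int) (Nat.div_add_mod b (2 ^ (k+1))).symm
    have hrlt : b % 2 ^ (k+1) < 2 ^ (k+1) := Nat.mod_lt _ (Nat.two_pow_pos _)
    have hsplitA : A = (((2 ^ (k+1) : Nat) : Int) - 1 - ((b % 2 ^ (k+1) : Nat) : Int))
        + (-(((b / 2 ^ (k+1) : Nat) : Int)) - 1) * ((2 ^ (k+1) : Nat) : Int) := by
      rw [hA', hdm]; ring
    have hmod : A % (2:Int) ^ (k + 1)
        = ((2 ^ (k+1) : Nat) : Int) - 1 - ((b % 2 ^ (k+1) : Nat) : Int) := by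
      rw [hM, hsplitA, Int.add_mul_emod_self_right]
      exact Int.emod_eq_of_lt (by push_cast; omega) (by push_cast; omega)
    rw [hmod]
    have hb := natbit b k
    have hpow : 2 ^ (k+1) = 2 ^ k * 2 := by ring
    have hposk : 0 < 2 ^ k := Nat.two_pow_pos k
    rcases hfin : b.testBit k with _ | _
    · have h1 : ¬ 2 ^ k ≤ b % 2 ^ (k+1) := fun h => by simp [hb.mpr h] at hfin
      simp only [Bool.toNat_false, Nat.mul_zero, Nat.sub_zero]
      exact iff_of_false (by omega) (by omega)
    · have h1 : 2 ^ k ≤ b % 2 ^ (k+1) := hb.mp hfin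
      simp only [Bool.toNat_true, Nat.mul_one]
      exact iff_of_true (by omega) (by omega)

-- `X | 2^k = X + 2^k` for 0 ≤ X < 2^k
theorem bor_lt (X : Int) (k : Nat) (h0 : 0 ≤ X) (h : X < (2:Int) ^ k) :
    PySem.Int.bor X ((2:Int) ^ k) = X + 2 ^ k := by
  have hcast : ((2:Int) ^ k) = ((2 ^ k : Nat) : Int) := by push_cast; ring
  unfold PySem.Int.bor
  rw [if_pos h0, if_pos (by positivity), hcast, Int.toNat_natCast]
  have hlt : X.toNat < 2 ^ k := by omega
  have := Nat.two_pow_add_eq_or_of_lt hlt 1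
  rw [mul_one] at this
  rw [Nat.lor_comm, ← this]
  omega

-- `x ^^^ 2^k = x + 2^k` for x < 2^k (Nat)
theorem nat_xor_two_pow (x k : Nat) (h : x < 2 ^ k) : x ^^^ 2 ^ k = x + 2 ^ k := by
  have hor := Nat.two_pow_add_eq_or_of_lt h 1
  rw [mul_one] at hor
  have hxo : x ^^^ 2 ^ k = 2 ^ k ||| x := by
    apply Nat.eq_of_testBit_eq
    intro i
    rw [Nat.testBit_xor, Nat.testBit_or, Nat.testBit_two_pow]
    by_cases hik : k = i
    · subst hik
      rw [Nat.testBit_lt_two_pow h]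
      simp
    · simp [hik]
  omega

-- `X ^ 2^k = X + 2^k` for 0 ≤ X < 2^k
theorem bxor_lt (X : Int) (k : Nat) (h0 : 0 ≤ X) (h : X < (2:Int) ^ k) :
    PySem.Int.bxor X ((2:Int) ^ k) = X + 2 ^ k := by
  have hcast : ((2:Int) ^ k) = ((2 ^ k : Nat) : Int) := by push_cast; ring
  unfold PySem.Int.bxor
  rw [if_pos h0, if_pos (by positivity), hcast, Int.toNat_natCast]
  rw [nat_xor_two_pow _ _ (by omega)]
  omega

-- residues: A % 2^k from A % 2^(k+1)
theorem modstep (A : Int) (k : Nat) :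
    A % (2:Int) ^ k
      = (if A % (2:Int) ^ (k+1) < 2 ^ k then A % (2:Int) ^ (k+1)
         else A % (2:Int) ^ (k+1) - 2 ^ k) := by
  have hdvd : ((2:Int) ^ k) ∣ ((2:Int) ^ (k+1)) := pow_dvd_pow 2 (by omega)
  have hposk : (0:Int) < 2 ^ k := by positivity
  have hpos : (0:Int) < 2 ^ (k+1) := by positivity
  have h1 : A % (2:Int) ^ k = (A % (2:Int) ^ (k+1)) % (2:Int) ^ k :=
    (Int.emod_emod_of_dvd A hdvd).symm
  have hge : 0 ≤ A % (2:Int) ^ (k+1) := Int.emod_nonneg A (by positivity)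
  have hlt : A % (2:Int) ^ (k+1) < 2 ^ (k+1) := Int.emod_lt_of_pos A hpos
  have hpow : (2:Int) ^ (k+1) = 2 ^ k * 2 := by ring
  rw [h1]
  split_ifs with hc
  · exact Int.emod_eq_of_lt hge hc
  · rw [← Int.sub_emod_right (A % (2:Int) ^ (k+1)) ((2:Int) ^ k)]
    exact Int.emod_eq_of_lt (by omega) (by omega)

-- the loop invariant: after the first n iterations, X is the complement of A's low n bits
theorem loop_inv (A : Int) (n : Nat) :
    (List.range n).foldl
      (fun (X : Int) (k : Nat) => if PySem.Int.band ((1:Int) <<< (k : Int)) A = 0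
                  then PySem.Int.bor X ((1:Int) <<< (k : Int)) else X) 0
    = (2:Int) ^ n - 1 - A % (2:Int) ^ n := by
  induction n with
  | zero => simp
  | succ n ih =>
    rw [List.range_succ, List.foldl_append, ih]
    simp only [List.foldl_cons, List.foldl_nil]
    have hsh : ((1:Int) <<< (n : Int)) = (2:Int) ^ n := by rw [Int.one_shiftLeft]; push_cast; ring
    have hposk : (0:Int) < 2 ^ n := by positivity
    have hge : 0 ≤ A % (2:Int) ^ n := Int.emod_nonneg A (by positivity)
    have hlt : A % (2:Int) ^ n < 2 ^ n := Int.emod_lt_of_pos A hposk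
    have hms := modstep A n
    have hpow : (2:Int) ^ (n+1) = 2 ^ n * 2 := by ring
    rw [hsh]
    by_cases hb : PySem.Int.band ((2:Int) ^ n) A = 0
    · rw [if_pos hb]
      have hr := (bitzero A n).mp hb
      rw [bor_lt _ _ (by omega) (by omega)]
      rw [if_pos hr] at hms
      omega
    · rw [if_neg hb]
      have hr : ¬ A % (2:Int) ^ (n+1) < 2 ^ n := fun h => hb ((bitzero A n).mpr h)
      rw [if_neg hr] at hms
      omega

-- the whole of A's body equals B's closed form, for any l
theorem closed_form (A : Int) (l : Int) :
    PySem.Int.bxor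
      ((PySem.List.pyRange 0 l 1).foldl
        (fun X i =>
          if PySem.Int.band ((1:Int) <<< i.toNat) A = 0
          then PySem.Int.bor X ((1:Int) <<< i.toNat) else X) 0)
      ((1:Int) <<< l.toNat)
    = 2 * ((1:Int) <<< l.toNat) - 1 - PySem.Int.mod A ((1:Int) <<< l.toNat) := by
  set n : Nat := l.toNat with hn
  have hfold : (PySem.List.pyRange 0 l 1).foldl
      (fun X i =>
        if PySem.Int.band ((1:Int) <<< i.toNat) A = 0
        then PySem.Int.bor X ((1:Int) <<< i.toNat) else X) 0
      = (List.range n).foldl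
        (fun (X : Int) (k : Nat) => if PySem.Int.band ((1:Int) <<< (k : Int)) A = 0
                    then PySem.Int.bor X ((1:Int) <<< (k : Int)) else X) 0 := by
    rw [pyRange01, List.foldl_map, ← hn]
    simp only [Int.toNat_natCast]
  have hshN : ((1:Int) <<< (n : Nat)) = (2:Int) ^ n := by rw [Int.shiftLeft_eq]; ring
  rw [hfold, loop_inv, hshN]
  have hposk : (0:Int) < 2 ^ n := by positivity
  have hge : 0 ≤ A % (2:Int) ^ n := Int.emod_nonneg A (by positivity)
  have hlt : A % (2:Int) ^ n < 2 ^ n := Int.emod_lt_of_pos A hposk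
  rw [bxor_lt _ _ (by omega) (by omega)]
  rw [PySem.Int.mod_eq_emod_of_pos hposk]
  ring

-- ===== VERDICT (by name: the statement is the Claim_ definition above) =====
theorem solve_spec : Claim_equal_solve := by
  intro A _
  unfold Spec_solve solve solve_alt
  exact closed_form A (PySem.Str.len (PySem.Int.pyBin A) - 2)
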